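-- pv_equiv track=rewrite | github.com/saurabh-kumbhar/python-course-practice | CompletePythonCourse/PythonCourse-master/Section_04/assignment_08.py | sum78
-- ===== SOURCE A (Python) =====
-- def sum78(num_list):
--     if len(num_list) == 0:
--         return 0
--
--     summation = 0
--     is_in_range = False
--
--     for item in num_list:
--         if item == 7 and not is_in_range:
--             is_in_range = True
--             continue
--         if item != 8 and is_in_range:
--             continue
--         if item == 8 and is_in_range:
--             is_in_range = False
--             continue
--
--         summation += item
--
--     return summation
-- ===== SOURCE B (Python) =====
-- def sum78(num_list):
--     total = 0
--     i = 0
--     n = len(num_list)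
--     while i < n:
--         if num_list[i] == 7:
--             i += 1
--             while i < n and num_list[i] != 8:
--                 i += 1
--             i += 1  # skip the terminating 8 (or run off the end)
--         else:
--             total += num_list[i]
--             i += 1
--     return total
-- ===== Notes on version B (the rewrite author's own statement) =====
-- stated objective: alternative
-- what changed: Replaces A's flag-driven single pass with an index-based outer scan that, on seeing a 7, runs an inner skip loop advancing the index past everything up to and including the next 8.
import Mathlib
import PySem

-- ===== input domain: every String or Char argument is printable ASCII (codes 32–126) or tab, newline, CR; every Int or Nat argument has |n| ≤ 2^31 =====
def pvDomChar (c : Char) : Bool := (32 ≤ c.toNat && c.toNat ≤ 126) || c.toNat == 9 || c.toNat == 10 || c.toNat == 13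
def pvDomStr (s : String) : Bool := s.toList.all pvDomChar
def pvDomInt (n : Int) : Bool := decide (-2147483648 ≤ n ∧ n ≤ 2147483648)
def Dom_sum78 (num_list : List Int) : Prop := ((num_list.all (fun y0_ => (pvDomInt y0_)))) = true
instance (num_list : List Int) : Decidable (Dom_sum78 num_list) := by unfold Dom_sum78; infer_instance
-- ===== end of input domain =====

-- B replaces A's boolean-flag pass by an index scan with an inner skip loop; same values everywhere (objective: alternative).

-- ===== PORT A =====
-- A's for-loop over (summation, is_in_range), branches in source order.
def sum78Go : List Int → Int → Bool → Int
  | [], summation, _ => summation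
  | item :: rest, summation, is_in_range =>
    if item = 7 ∧ is_in_range = false then sum78Go rest summation true
    else if item ≠ 8 ∧ is_in_range = true then sum78Go rest summation is_in_range
    else if item = 8 ∧ is_in_range = true then sum78Go rest summation false
    else sum78Go rest (summation + item) is_in_range

def sum78 (num_list : List Int) : Int :=
  if num_list.length = 0 then 0 else sum78Go num_list 0 false

-- ===== PORT B =====
-- inner while: advance i while i < n and num_list[i] != 8
def sum78Skip (nl : List Int) (n : Nat) (i : Nat) : Nat :=
  if _h : i < n ∧ nl.getD i 0 ≠ 8 then sum78Skip nl n (i + 1) else i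
  termination_by n - i
  decreasing_by omega

theorem sum78Skip_ge (nl : List Int) (n i : Nat) : i ≤ sum78Skip nl n i := by
  fun_induction sum78Skip with
  | case1 i h ih => omega
  | case2 i h => omega

-- outer while over index i and accumulator total
def sum78Outer (nl : List Int) (n : Nat) (i : Nat) (total : Int) : Int :=
  if _h : i < n then
    if nl.getD i 0 = 7 then sum78Outer nl n (sum78Skip nl n (i + 1) + 1) total
    else sum78Outer nl n (i + 1) (total + nl.getD i 0)
  else total
  termination_by n - i
  decreasing_by
  · have := sum78Skip_ge nl n (i + 1); omega
  · omega

def sum78_alt (num_list : List Int) : Int :=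
  sum78Outer num_list num_list.length 0 0

-- ===== PRECONDITION & SPEC =====
def Spec_sum78 (num_list : List Int) (out : Int) : Prop := out = sum78_alt num_list
instance (num_list : List Int) (out : Int) : Decidable (Spec_sum78 num_list out) := by unfold Spec_sum78; infer_instance

-- ===== CLAIM (what is proved, stated in full; the proofs are below) =====
def Claim_equal_sum78 : Prop := ∀ (num_list : List Int), Dom_sum78 num_list → Spec_sum78 num_list (sum78 num_list)

-- ===== LEMMAS AND PROOFS =====

-- proof-only helper: the list left after skipping through the first 8
def skipTo8 : List Int → List Int
  | [] => []
  | x :: xs => if x = 8 then xs else skipTo8 xs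

theorem goA_true_eq (xs : List Int) (s : Int) :
    sum78Go xs s true = sum78Go (skipTo8 xs) s false := by
  induction xs generalizing s with
  | nil => rfl
  | cons x xs ih =>
    by_cases h8 : x = 8
    · subst h8; simp [sum78Go, skipTo8]
    · simp [sum78Go, skipTo8, h8, ih]

theorem drop_skip_eq (nl : List Int) (i : Nat) :
    nl.drop (sum78Skip nl nl.length i + 1) = skipTo8 (nl.drop i) := by
  fun_induction sum78Skip nl nl.length i with
  | case1 i h ih =>
    obtain ⟨hlt, hne⟩ := h
    have hget : nl.drop i = nl.getD i 0 :: nl.drop (i + 1) := by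
      rw [List.getD_eq_getElem?_getD, List.drop_eq_getElem_cons hlt]
      simp [List.getElem?_eq_getElem hlt]
    rw [ih, hget, skipTo8, if_neg hne]
  | case2 i h =>
    by_cases hlt : i < nl.length
    · have h8 : nl.getD i 0 = 8 := by
        by_contra hne; exact h ⟨hlt, hne⟩
      have hget : nl.drop i = nl.getD i 0 :: nl.drop (i + 1) := by
        rw [List.getD_eq_getElem?_getD, List.drop_eq_getElem_cons hlt]
        simp [List.getElem?_eq_getElem hlt]
      rw [hget, h8, skipTo8, if_pos rfl]
    · have h1 : nl.drop i = [] := List.drop_eq_nil_of_le (by omega)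
      have h2 : nl.drop (i + 1) = [] := List.drop_eq_nil_of_le (by omega)
      rw [h1, h2, skipTo8]

theorem outer_eq_goA (nl : List Int) (i : Nat) (t : Int) :
    sum78Outer nl nl.length i t = sum78Go (nl.drop i) t false := by
  fun_induction sum78Outer nl nl.length i t with
  | case1 i t hlt h7 ih =>
    have hget : nl.drop i = nl.getD i 0 :: nl.drop (i + 1) := by
      rw [List.getD_eq_getElem?_getD, List.drop_eq_getElem_cons hlt]
      simp [List.getElem?_eq_getElem hlt]
    rw [ih, drop_skip_eq, hget, h7]
    rw [show sum78Go (7 :: nl.drop (i+1)) t false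
        = sum78Go (nl.drop (i+1)) t true from by simp [sum78Go]]
    exact (goA_true_eq _ _).symm
  | case2 i t hlt h7 ih =>
    have hget : nl.drop i = nl.getD i 0 :: nl.drop (i + 1) := by
      rw [List.getD_eq_getElem?_getD, List.drop_eq_getElem_cons hlt]
      simp [List.getElem?_eq_getElem hlt]
    rw [ih, hget]
    simp only [List.getD_eq_getElem?_getD] at h7
    simp [sum78Go, h7]
  | case3 i t h =>
    rw [List.drop_eq_nil_of_le (by omega), sum78Go]

-- ===== VERDICT (by name: the statement is the Claim_ definition above) =====
theorem sum78_spec : Claim_equal_sum78 := by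
  intro nl _
  unfold Spec_sum78 sum78 sum78_alt
  rw [outer_eq_goA nl 0 0, List.drop_zero]
  split
  · next h => rw [List.length_eq_zero_iff.mp h]; rfl
  · rfl
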